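-- pv_equiv track=rewrite | github.com/diplat-dev/BuildTools | WynnCrafter/crafter_optimizer.py | _find_exact_removal_index
-- ===== SOURCE A (Python) =====
-- def _find_exact_removal_index(
--     candidate_names: list[str],
--     protected_names: set[str],
--     allow_protected: bool,
-- ) -> int | None:
--     for remove_index in range(len(candidate_names) - 1, -1, -1):
--         ingredient_name = candidate_names[remove_index]
--         if ingredient_name == "No Ingredient":
--             continue
--         if allow_protected or ingredient_name not in protected_names:
--             return remove_index
--     if allow_protected and candidate_names:
--         return len(candidate_names) - 1
--     return None
-- ===== SOURCE B (Python) =====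
-- def _find_exact_removal_index(
--     candidate_names: list[str],
--     protected_names: set[str],
--     allow_protected: bool,
-- ) -> int | None:
--     n = len(candidate_names)
--     if allow_protected:
--         # Protection is irrelevant: answer is pure arithmetic on the
--         # trailing run of "No Ingredient" slots.
--         trailing = 0
--         while trailing < n and candidate_names[n - 1 - trailing] == "No Ingredient":
--             trailing += 1
--         if trailing < n:
--             return n - 1 - trailing
--         return n - 1 if n else None
--     # Protection matters: keep the last unprotected real ingredient seen
--     # in a single forward pass; no fallback exists in this mode.
--     best = None
--     for index, name in enumerate(candidate_names):
--         if name != "No Ingredient" and name not in protected_names: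
--             best = index
--     return best
-- ===== Notes on version B (the rewrite author's own statement) =====
-- stated objective: alternative
-- what changed: B splits on allow_protected: when protection is irrelevant it computes the answer arithmetically from the length of the trailing 'No Ingredient' run (never touching protected_names), otherwise it does one forward keep-last fold; A is a single backward early-return scan over both cases.
import Mathlib
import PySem

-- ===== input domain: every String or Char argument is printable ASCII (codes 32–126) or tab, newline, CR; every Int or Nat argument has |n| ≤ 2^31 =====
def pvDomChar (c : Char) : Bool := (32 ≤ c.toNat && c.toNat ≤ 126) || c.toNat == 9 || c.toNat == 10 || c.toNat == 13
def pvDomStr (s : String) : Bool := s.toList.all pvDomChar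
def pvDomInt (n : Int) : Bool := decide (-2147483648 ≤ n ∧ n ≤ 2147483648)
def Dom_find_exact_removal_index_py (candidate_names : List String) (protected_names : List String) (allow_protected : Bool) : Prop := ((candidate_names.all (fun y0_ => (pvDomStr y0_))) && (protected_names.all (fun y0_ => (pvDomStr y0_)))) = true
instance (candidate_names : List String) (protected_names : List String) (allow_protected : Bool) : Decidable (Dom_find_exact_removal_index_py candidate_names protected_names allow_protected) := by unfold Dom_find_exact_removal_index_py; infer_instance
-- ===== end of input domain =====

-- B splits on allow_protected: when protection is moot the answer is arithmetic on the
-- trailing "No Ingredient" run; otherwise one forward keep-last fold (objective: alternative).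

-- ===== PORT A =====
-- the reverse for-loop with early return: recursion over the countdown index list
def pyA_go (candidate_names : List String) (protected_names : List String)
    (allow_protected : Bool) : List Int → Option Int
  | [] => none
  | i :: rest =>
    match PySem.List.pyGet? candidate_names i with
    | none => pyA_go candidate_names protected_names allow_protected rest  -- unreachable: i is always in range
    | some ingredient_name =>
      if ingredient_name == "No Ingredient" then
        pyA_go candidate_names protected_names allow_protected rest
      else if allow_protected || !(protected_names.contains ingredient_name) then
        some i
      else
        pyA_go candidate_names protected_names allow_protected rest

def find_exact_removal_index_py (candidate_names : List String) (protected_names : List String) (allow_protected : Bool) : Option Int :=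
  match pyA_go candidate_names protected_names allow_protected
      (PySem.List.pyRange ((candidate_names.length : Int) - 1) (-1) (-1)) with
  | some i => some i
  | none =>
    if allow_protected && !candidate_names.isEmpty then
      some ((candidate_names.length : Int) - 1)
    else
      none

-- ===== PORT B =====
-- the while loop: count the trailing run of "No Ingredient" (index n-1-t is in range while t < n)
def pyB_trailing (candidate_names : List String) (n : Nat) (t : Nat) : Nat :=
  if h : t < n then
    if candidate_names.getD (n - 1 - t) "" == "No Ingredient" then
      pyB_trailing candidate_names n (t + 1)
    else t
  else t
termination_by n - t
decreasing_by omega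

def find_exact_removal_index_py_alt (candidate_names : List String) (protected_names : List String) (allow_protected : Bool) : Option Int :=
  let n := candidate_names.length
  if allow_protected then
    let trailing := pyB_trailing candidate_names n 0
    if trailing < n then some ((n : Int) - 1 - trailing)
    else if n ≠ 0 then some ((n : Int) - 1) else none
  else
    (PySem.List.enumerate candidate_names 0).foldl (fun best p =>
      if p.2 != "No Ingredient" && !(protected_names.contains p.2) then some p.1 else best) none

-- ===== PRECONDITION & SPEC =====
def Spec_find_exact_removal_index_py (candidate_names : List String) (protected_names : List String) (allow_protected : Bool) (out : Option Int) : Prop := out = find_exact_removal_index_py_alt candidate_names protected_names allow_protected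
instance (candidate_names : List String) (protected_names : List String) (allow_protected : Bool) (out : Option Int) : Decidable (Spec_find_exact_removal_index_py candidate_names protected_names allow_protected out) := by unfold Spec_find_exact_removal_index_py; infer_instance

-- ===== CLAIM (what is proved, stated in full; the proofs are below) =====
def Claim_equal_find_exact_removal_index_py : Prop := ∀ (candidate_names : List String) (protected_names : List String) (allow_protected : Bool), Dom_find_exact_removal_index_py candidate_names protected_names allow_protected → Spec_find_exact_removal_index_py candidate_names protected_names allow_protected (find_exact_removal_index_py candidate_names protected_names allow_protected)

-- ===== LEMMAS AND PROOFS =====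

-- the valid-removal predicate used in the allow_protected = false case
def pvPred (candidate_names : List String) (protected_names : List String) (i : Int) : Bool :=
  match PySem.List.pyGet? candidate_names i with
  | none => false
  | some name => name != "No Ingredient" && !(protected_names.contains name)

-- A's loop with allow_protected = false returns the first index of its list satisfying pvPred
theorem pyA_go_false_eq_head_filter (cs ps : List String) (l : List Int) :
    pyA_go cs ps false l = (l.filter (pvPred cs ps)).head? := by
  induction l with
  | nil => rfl
  | cons i rest ih =>
    cases h : PySem.List.pyGet? cs i with
    | none => simp [pyA_go, pvPred, h, ih]
    | some name =>
      by_cases h1 : name = "No Ingredient"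
      · simp [pyA_go, pvPred, h, h1, ih]
      · by_cases h2 : name ∈ ps
        · simp [pyA_go, pvPred, h, h1, h2, ih]
        · simp [pyA_go, pvPred, h, h1, h2]

-- a keep-last fold is the last element of the guarded filterMap (else the accumulator)
theorem foldl_keepLast {α β : Type} (q : α → Bool) (g : α → β) (l : List α) (a : Option β) :
    l.foldl (fun b p => if q p then some (g p) else b) a
      = ((l.filterMap (fun p => if q p then some (g p) else none)).getLast?).or a := by
  induction l generalizing a with
  | nil => rfl
  | cons p rest ih =>
    by_cases h : q p
    · simp only [List.foldl_cons, ih, h, if_true, List.filterMap_cons]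
      cases hr : (rest.filterMap (fun p => if q p then some (g p) else none)) with
      | nil => simp
      | cons y ys => simp [List.getLast?]
        
    · simp [List.foldl_cons, ih, h]

-- guard-style filterMap is filter
theorem filterMap_guard_eq_filter (l : List Int) (p : Int → Bool) :
    l.filterMap (fun j => if p j then some j else none) = l.filter p := by
  induction l with
  | nil => rfl
  | cons j rest ih =>
    cases h : p j <;> (simp only [List.filterMap_cons, List.filter_cons, h, ih]; rfl)

-- B's fold over enumerate seen as a fold over the guarded filterMap of the forward range
theorem enum_filterMap_eq_filter (cs ps : List String) :
    (PySem.List.enumerate cs 0).filterMap (fun p =>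
        if p.2 != "No Ingredient" && !(ps.contains p.2) then some p.1 else none)
      = (PySem.List.pyRange 0 (cs.length : Int) 1).filter (pvPred cs ps) := by
  rw [PySem.List.enumerate_eq_map_pyRange (d := ""), List.filterMap_map,
    ← filterMap_guard_eq_filter _ (pvPred cs ps)]
  apply List.filterMap_congr
  intro j hj
  have hmem := (PySem.List.mem_pyRange_one).mp hj
  have h2 : j < (cs.length : Int) := by
    have := hmem.2; simp only [PySem.List.len_eq] at this ⊢; omega
  have hj2 : j.toNat < cs.length := by omega
  have hget : PySem.List.pyGet? cs j = some (cs[j.toNat]'hj2) :=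
    PySem.List.pyGet?_eq_some_getElem cs hmem.1 h2
  have hgetD : PySem.List.pyGetD cs j "" = cs[j.toNat]'hj2 := by
    simp [PySem.List.pyGetD, hget]
  simp [Function.comp, pvPred, hget, hgetD]

-- the countdown range is the reverse of the forward range
theorem countdown_eq_reverse (n : Nat) :
    PySem.List.pyRange ((n : Int) - 1) (-1) (-1)
      = (PySem.List.pyRange 0 (n : Int) 1).reverse := by
  rw [PySem.List.pyRange_neg_one_eq_reverse]
  norm_num

-- with allow_protected = true, A's reverse scan from index n-1-t computes exactly
-- B's trailing-run arithmetic continued from t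
theorem pyA_go_true_eq_trailing (cs ps : List String) :
    ∀ t : Nat, t ≤ cs.length →
      pyA_go cs ps true (PySem.List.pyRange ((cs.length : Int) - 1 - t) (-1) (-1))
        = (if pyB_trailing cs cs.length t < cs.length
           then some ((cs.length : Int) - 1 - (pyB_trailing cs cs.length t : Int))
           else none) := by
  intro t ht
  induction hfuel : cs.length - t using Nat.strong_induction_on generalizing t with
  | _ fuel ih =>
  by_cases h : t < cs.length
  · have hcast : ((cs.length : Int) - 1 - (t : Int)) = ((cs.length - 1 - t : Nat) : Int) := by
      omega
    have hlt : (-1 : Int) < (cs.length : Int) - 1 - t := by omega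
    rw [PySem.List.pyRange_neg_one_cons hlt]
    have hidx : (cs.length - 1 - t : Nat) < cs.length := by omega
    have hget : PySem.List.pyGet? cs ((cs.length : Int) - 1 - t)
        = some cs[cs.length - 1 - t] := by
      rw [hcast]
      have := PySem.List.pyGet?_eq_some_getElem cs
        (i := ((cs.length - 1 - t : Nat) : Int)) (by omega) (by exact_mod_cast hidx)
      exact this
    have hopt : cs[cs.length - 1 - t]? = some cs[cs.length - 1 - t] :=
      List.getElem?_eq_getElem hidx
    by_cases hNI : cs[cs.length - 1 - t] = "No Ingredient"
    · have htrec : pyB_trailing cs cs.length t = pyB_trailing cs cs.length (t + 1) := by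
        rw [pyB_trailing]; simp [h, hopt, hNI]
      have hstep : (cs.length : Int) - 1 - (t : Int) - 1 = (cs.length : Int) - 1 - ((t + 1 : Nat) : Int) := by
        push_cast; ring
      rw [htrec]
      simp only [pyA_go, hget, hNI]
      rw [hstep]
      by_cases ht1 : t + 1 ≤ cs.length
      · exact ih (cs.length - (t + 1)) (by omega) (t + 1) ht1 rfl
      · omega
    · have htstop : pyB_trailing cs cs.length t = t := by
        rw [pyB_trailing]; simp [h, hopt, hNI]
      simp [pyA_go, hget, hNI, htstop, h]
  · have heq : t = cs.length := by omega
    subst heq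
    have hnil : PySem.List.pyRange ((cs.length : Int) - 1 - (cs.length : Nat)) (-1) (-1) = [] :=
      PySem.List.pyRange_neg_one_eq_nil (by omega)
    have htstop : pyB_trailing cs cs.length cs.length = cs.length := by
      rw [pyB_trailing]; simp
    rw [hnil]
    simp [pyA_go, htstop]

-- ===== VERDICT (by name: the statement is the Claim_ definition above) =====
theorem find_exact_removal_index_py_spec : Claim_equal_find_exact_removal_index_py := by
  intro cs ps ap _
  unfold Spec_find_exact_removal_index_py
  unfold find_exact_removal_index_py find_exact_removal_index_py_alt
  cases ap with
  | false =>
    simp only [Bool.false_and, if_neg (by exact Bool.false_ne_true)]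
    rw [foldl_keepLast, enum_filterMap_eq_filter, Option.or_none,
      pyA_go_false_eq_head_filter, countdown_eq_reverse, List.filter_reverse,
      List.head?_reverse]
    cases ((PySem.List.pyRange 0 (cs.length : Int) 1).filter (pvPred cs ps)).getLast? <;> rfl
  | true =>
    have h0 : ((cs.length : Int) - 1) = ((cs.length : Int) - 1 - ((0 : Nat) : Int)) := by
      norm_num
    rw [h0, pyA_go_true_eq_trailing cs ps 0 (Nat.zero_le _)]
    by_cases h : pyB_trailing cs cs.length 0 < cs.length
    · simp [h]
    · by_cases hn : cs.length = 0
      · have he : cs = [] := List.eq_nil_of_length_eq_zero hn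
        simp [he]
      · have he : cs ≠ [] := by intro e; exact hn (by simp [e])
        simp [h, hn, he]
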